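-- pv_equiv track=rewrite | github.com/utacs/cs378-cloud-computing-a6-ThatWugg | utils.py | is_valid_line1
-- ===== SOURCE A (Python) =====
-- def is_valid_line1 (line: str):
--     # check comma count
--     comma_count: int = 0
--     first_comma_idx: int = None # keep track of driver id index
--     second_comma_idx: int = None # keep track of end of driver id
--     for idx in range(len(line)):
--         if line[idx] == ',':
--             comma_count += 1
--             if comma_count == 1:
--                 first_comma_idx = idx
--             if comma_count == 2:
--                 second_comma_idx = idx
--     if comma_count != 16:
--         return False
--
--     # ensure that length of md5sums are correct
--     if first_comma_idx != 32: return False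
--     if second_comma_idx != 65: return False
--     # ensure that contents of md5sums are correct
--     # by checking they are hexadecimal
--     for idx in range(first_comma_idx):
--         if not is_hexadecimal(line[idx]):
--             return False
--
--     for idx in range(first_comma_idx + 1, second_comma_idx):
--         if not is_hexadecimal(line[idx]):
--             return False
--
--     return True
--
-- def is_hexadecimal (char: str):
--     ascii: int = ord(char)
--     if (ascii >= 48 and ascii <= 57 or # 0-9
--        ascii >= 65 and ascii <= 70 or # A-F
--        ascii >= 97 and ascii <= 102):  # a-f
--         return True
--     return False
-- ===== SOURCE B (Python) =====
-- def is_valid_line1(line: str):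
--     parts = line.split(',')
--     return (len(parts) == 17
--             and len(parts[0]) == 32
--             and len(parts[1]) == 32
--             and all(is_hexadecimal(c) for c in parts[0] + parts[1]))
--
-- def is_hexadecimal(char: str):
--     ascii: int = ord(char)
--     if (ascii >= 48 and ascii <= 57 or
--        ascii >= 65 and ascii <= 70 or
--        ascii >= 97 and ascii <= 102):
--         return True
--     return False
-- ===== Notes on version B (the rewrite author's own statement) =====
-- stated objective: simpler
-- what changed: Replaced the manual index scan that tracks comma count and the first/second comma positions (plus two index-based hex loops) by one str.split on the comma whose part count and first two part lengths give the same checks, with a single comprehension hex-testing the two md5 fields.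
import Mathlib
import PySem

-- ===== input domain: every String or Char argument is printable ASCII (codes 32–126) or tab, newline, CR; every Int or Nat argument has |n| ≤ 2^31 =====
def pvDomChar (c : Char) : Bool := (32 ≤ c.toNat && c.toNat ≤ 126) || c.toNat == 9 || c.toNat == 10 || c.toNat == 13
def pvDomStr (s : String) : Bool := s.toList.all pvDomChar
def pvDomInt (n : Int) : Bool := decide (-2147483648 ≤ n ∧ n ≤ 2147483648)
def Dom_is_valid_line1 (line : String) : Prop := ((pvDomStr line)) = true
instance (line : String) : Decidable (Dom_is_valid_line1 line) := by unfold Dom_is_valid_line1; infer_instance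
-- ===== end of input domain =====

-- B replaces A's manual index scan (comma count + first/second comma positions + two index hex loops)
-- by one split(',') with part-count/part-length checks and a single hex pass over the two md5 parts.


-- ===== PORT A =====
-- helper: Python's is_hexadecimal (shared: Source B keeps the same helper)
def isHexadecimal (c : Char) : Bool :=
  let a : Int := c.toNat
  if (48 ≤ a ∧ a ≤ 57) ∨ (65 ≤ a ∧ a ≤ 70) ∨ (97 ≤ a ∧ a ≤ 102) then true else false

-- one step of A's scan: state = (comma_count, first_comma_idx, second_comma_idx), input = (idx, line[idx])
def stepA (st : Int × Option Int × Option Int) (p : Int × Char) : Int × Option Int × Option Int :=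
  if p.2 = ',' then
    let cc := st.1 + 1
    let f := if cc = 1 then some p.1 else st.2.1
    let s := if cc = 2 then some p.1 else st.2.2
    (cc, f, s)
  else st

def is_valid_line1 (line : String) : Bool :=
  let cs := line.toList
  -- for idx in range(len(line)): if line[idx] == ',': …
  let st := (PySem.List.pyRange 0 (cs.length : Int) 1).foldl
    (fun st idx => stepA st (idx, PySem.List.pyGetD cs idx ' ')) (0, none, none)
  if st.1 ≠ 16 then false
  else if st.2.1 ≠ some 32 then false
  else if st.2.2 ≠ some 65 then false
  else
    match st.2.1, st.2.2 with
    | some f, some s =>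
      -- for idx in range(first_comma_idx): early-return-False loop ≡ .all
      ((PySem.List.pyRange 0 f 1).all fun idx => isHexadecimal (PySem.List.pyGetD cs idx ' ')) &&
      ((PySem.List.pyRange (f + 1) s 1).all fun idx => isHexadecimal (PySem.List.pyGetD cs idx ' '))
    | _, _ => false  -- unreachable: the two preceding guards ensure both are `some`

-- ===== PORT B =====
def is_valid_line1_alt (line : String) : Bool :=
  let parts := PySem.Chars.splitOn line.toList [',']
  decide (parts.length = 17) &&
  decide ((parts.getD 0 []).length = 32) &&
  decide ((parts.getD 1 []).length = 32) &&
  ((parts.getD 0 []) ++ (parts.getD 1 [])).all isHexadecimal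

-- ===== PRECONDITION & SPEC =====
def Spec_is_valid_line1 (line : String) (out : Bool) : Prop := out = is_valid_line1_alt line
instance (line : String) (out : Bool) : Decidable (Spec_is_valid_line1 line out) := by unfold Spec_is_valid_line1; infer_instance

-- ===== CLAIM (what is proved, stated in full; the proofs are below) =====
def Claim_equal_is_valid_line1 : Prop := ∀ (line : String), Dom_is_valid_line1 line → Spec_is_valid_line1 line (is_valid_line1 line)

-- ===== LEMMAS AND PROOFS =====

-- reference recursion for splitOn with a single-char separator
def splitAux : List Char → List Char → List (List Char)
  | [], cur => [cur.reverse]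
  | c :: rest, cur => if c = ',' then cur.reverse :: splitAux rest [] else splitAux rest (c :: cur)

theorem go_eq_splitAux (l : List Char) : ∀ (fuel : Nat) (cur : List Char) (acc : List (List Char)),
    l.length < fuel →
    PySem.Chars.splitOn.go [','] fuel l cur acc = acc.reverse ++ splitAux l cur := by
  induction l with
  | nil =>
    intro fuel cur acc h
    match fuel, h with
    | fuel + 1, _ => simp [PySem.Chars.splitOn.go, splitAux]
  | cons c rest ih =>
    intro fuel cur acc h
    match fuel, h with
    | fuel + 1, h =>
      by_cases hc : c = ','
      · subst hc
        have hp : List.isPrefixOf [','] (',' :: rest) = true := by simp [List.isPrefixOf]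
        simp only [PySem.Chars.splitOn.go, hp, if_pos, List.length_cons, List.drop_succ_cons,
          List.length_nil, List.drop_zero]
        rw [ih fuel [] (cur.reverse :: acc) (by simpa using h)]
        simp [splitAux]
      · have hp : List.isPrefixOf [','] (c :: rest) = false := by
          simp only [List.isPrefixOf, Bool.and_eq_false_iff, beq_eq_false_iff_ne, ne_eq]
          exact Or.inl (fun hx => hc hx.symm)
        simp only [PySem.Chars.splitOn.go, hp]
        rw [if_neg (by simp [Ne.symm hc])]
        rw [ih fuel (c :: cur) acc (by simpa using h)]
        simp [splitAux, hc]

theorem splitOn_eq_splitAux (cs : List Char) :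
    PySem.Chars.splitOn cs [','] = splitAux cs [] := by
  rw [PySem.Chars.splitOn, go_eq_splitAux cs (cs.length + 1) [] [] (by omega)]
  simp

theorem splitAux_decomp (p : List Char) (r : List Char) (hp : ',' ∉ p) (cur : List Char) :
    splitAux (p ++ ',' :: r) cur = (cur.reverse ++ p) :: splitAux r [] := by
  induction p generalizing cur with
  | nil => simp [splitAux]
  | cons c p' ih =>
    simp only [List.mem_cons, not_or] at hp
    simp [splitAux, Ne.symm hp.1, ih hp.2]

theorem splitAux_length (cs : List Char) (cur : List Char) :
    (splitAux cs cur).length = cs.count ',' + 1 := by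
  induction cs generalizing cur with
  | nil => simp [splitAux]
  | cons c rest ih =>
    by_cases hc : c = ','
    · subst hc; simp [splitAux, ih]
    · simp [splitAux, hc, ih]

theorem stepA_comma (cc : Int) (f s : Option Int) (i : Int) :
    stepA (cc, f, s) (i, ',') = (cc + 1, if cc + 1 = 1 then some i else f, if cc + 1 = 2 then some i else s) := by
  simp [stepA]

theorem stepA_other (st : Int × Option Int × Option Int) (i : Int) (c : Char) (h : ¬ c = ',') :
    stepA st (i, c) = st := by
  simp [stepA, h]

-- A's scan: the count component
theorem foldA_count (cs : List Char) : ∀ (i cc : Int) (f s : Option Int),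
    ((PySem.List.enumerate cs i).foldl stepA (cc, f, s)).1 = cc + cs.count ',' := by
  induction cs with
  | nil => intro i cc f s; simp [PySem.List.enumerate_nil]
  | cons c rest ih =>
    intro i cc f s
    rw [PySem.List.enumerate_cons]
    by_cases hc : c = ','
    · subst hc
      simp only [List.foldl_cons, stepA_comma]
      rw [ih]
      simp [List.count_cons]; ring
    · simp only [List.foldl_cons, stepA_other _ _ _ hc]
      rw [ih]
      simp [List.count_cons, hc]

theorem foldA_no_comma (cs : List Char) (h : ',' ∉ cs) :
    ∀ (i : Int) (st : Int × Option Int × Option Int),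
    (PySem.List.enumerate cs i).foldl stepA st = st := by
  induction cs with
  | nil => intro i st; simp [PySem.List.enumerate_nil]
  | cons c rest ih =>
    simp only [List.mem_cons, not_or] at h
    intro i st
    rw [PySem.List.enumerate_cons]
    simp only [List.foldl_cons, stepA_other _ _ _ (fun hx => h.1 hx.symm)]
    exact ih h.2 _ _

theorem foldA_tail (cs : List Char) : ∀ (i cc : Int) (f s : Option Int), 2 ≤ cc →
    (PySem.List.enumerate cs i).foldl stepA (cc, f, s) = (cc + cs.count ',', f, s) := by
  induction cs with
  | nil => intro i cc f s h; simp [PySem.List.enumerate_nil]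
  | cons c rest ih =>
    intro i cc f s h
    rw [PySem.List.enumerate_cons]
    by_cases hc : c = ','
    · subst hc
      simp only [List.foldl_cons, stepA_comma]
      have h1 : ¬ (cc + 1 = 1) := by omega
      have h2 : ¬ (cc + 1 = 2) := by omega
      simp only [h1, h2, if_false]
      rw [ih _ _ _ _ (by omega)]
      simp [List.count_cons]; ring_nf
    · simp only [List.foldl_cons, stepA_other _ _ _ hc]
      rw [ih _ _ _ _ h]
      simp [List.count_cons, hc]

-- main characterization of A's scan on a two-comma decomposition
theorem foldA_main (p0 p1 r : List Char) (h0 : ',' ∉ p0) (h1 : ',' ∉ p1) :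
    (PySem.List.enumerate (p0 ++ ',' :: (p1 ++ ',' :: r)) 0).foldl stepA (0, none, none)
      = ((((p0 ++ ',' :: (p1 ++ ',' :: r)).count ',' : Nat) : Int),
         some (p0.length : Int), some ((p0.length : Int) + 1 + p1.length)) := by
  rw [PySem.List.enumerate_append, List.foldl_append, foldA_no_comma p0 h0,
      PySem.List.enumerate_cons]
  simp only [List.foldl_cons, stepA_comma]
  norm_num
  rw [PySem.List.enumerate_append, List.foldl_append, foldA_no_comma p1 h1,
      PySem.List.enumerate_cons]
  simp only [List.foldl_cons, stepA_comma]
  norm_num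
  rw [foldA_tail _ _ _ _ _ (by omega)]
  simp only [Prod.mk.injEq, List.count_append, List.count_cons,
    List.count_eq_zero.mpr h0, List.count_eq_zero.mpr h1]
  exact ⟨by push_cast; ring, trivial⟩

-- first-comma decomposition
theorem comma_decomp (cs : List Char) (h : ',' ∈ cs) :
    ∃ p r, cs = p ++ ',' :: r ∧ ',' ∉ p := by
  induction cs with
  | nil => cases h
  | cons c rest ih =>
    by_cases hc : c = ','
    · exact ⟨[], rest, by simp [hc], by simp⟩
    · have hr : ',' ∈ rest := by
        rcases List.mem_cons.mp h with h1 | h1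
        · exact absurd h1.symm hc
        · exact h1
      rcases ih hr with ⟨p, r, hpr, hp⟩
      refine ⟨c :: p, r, by simp [hpr], ?_⟩
      simp only [List.mem_cons, not_or]
      exact ⟨fun hx => hc hx.symm, hp⟩

-- the fold in port A equals the fold of stepA over enumerate
theorem portA_fold_eq (cs : List Char) :
    (PySem.List.pyRange 0 (cs.length : Int) 1).foldl
        (fun st idx => stepA st (idx, PySem.List.pyGetD cs idx ' ')) (0, none, none)
      = (PySem.List.enumerate cs 0).foldl stepA (0, none, none) := by
  have h := PySem.List.enumerate_eq_map_pyRange cs ' '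
  rw [PySem.List.len_eq] at h
  rw [h, List.foldl_map]

-- range-indexed hex scan over a prefix = all over the prefix
theorem all_range_prefix (p tail : List Char) (g : Char → Bool) (d : Char) :
    ((PySem.List.pyRange 0 (p.length : Int) 1).all fun idx => g (PySem.List.pyGetD (p ++ tail) idx d))
      = p.all g := by
  rw [Bool.eq_iff_iff]
  simp only [List.all_eq_true]
  constructor
  · intro h x hx
    rcases List.getElem_of_mem hx with ⟨k, hk, rfl⟩
    have hmem : ((k : Int)) ∈ PySem.List.pyRange 0 (p.length : Int) 1 := by
      rw [PySem.List.mem_pyRange_one]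
      exact ⟨Int.natCast_nonneg k, by exact_mod_cast hk⟩
    have h2 := h _ hmem
    rw [PySem.List.pyGetD_eq_getElem (p ++ tail) d (Int.natCast_nonneg k)
          (by simp only [List.length_append]; push_cast; omega)] at h2
    simp only [Int.toNat_natCast] at h2
    rwa [List.getElem_append_left hk] at h2
  · intro h i hi
    rw [PySem.List.mem_pyRange_one] at hi
    have hlt : i.toNat < p.length := by omega
    rw [PySem.List.pyGetD_eq_getElem (p ++ tail) d hi.1
          (by simp only [List.length_append]; push_cast; omega),
        List.getElem_append_left hlt]
    exact h _ (List.getElem_mem _)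

theorem all_range_mid (pre p tail : List Char) (g : Char → Bool) (d : Char) :
    ((PySem.List.pyRange (pre.length : Int) ((pre.length : Int) + (p.length : Int)) 1).all
        fun idx => g (PySem.List.pyGetD (pre ++ (p ++ tail)) idx d))
      = p.all g := by
  rw [Bool.eq_iff_iff]
  simp only [List.all_eq_true]
  constructor
  · intro h x hx
    rcases List.getElem_of_mem hx with ⟨k, hk, rfl⟩
    have hmem : ((pre.length : Int) + (k : Int)) ∈
        PySem.List.pyRange (pre.length : Int) ((pre.length : Int) + (p.length : Int)) 1 := by
      rw [PySem.List.mem_pyRange_one]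
      omega
    have h2 := h _ hmem
    rw [PySem.List.pyGetD_eq_getElem (pre ++ (p ++ tail)) d (by omega)
          (by simp only [List.length_append]; push_cast; omega)] at h2
    simp only [show ((pre.length : Int) + (k : Int)).toNat = pre.length + k from by omega] at h2
    rw [List.getElem_append_right (by omega)] at h2
    simp only [show pre.length + k - pre.length = k from by omega] at h2
    rwa [List.getElem_append_left hk] at h2
  · intro h i hi
    rw [PySem.List.mem_pyRange_one] at hi
    have hlt : i.toNat - pre.length < p.length := by omega
    rw [PySem.List.pyGetD_eq_getElem (pre ++ (p ++ tail)) d (by omega)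
          (by simp only [List.length_append]; push_cast; omega),
        List.getElem_append_right (by omega), List.getElem_append_left hlt]
    exact h _ (List.getElem_mem _)

-- ===== VERDICT (by name: the statement is the Claim_ definition above) =====
theorem foldA_count_zero (cs : List Char) :
    ((PySem.List.enumerate cs 0).foldl stepA (0, none, none)).1 = (cs.count ',' : Int) := by
  simpa using foldA_count cs 0 0 none none

theorem is_valid_line1_spec : Claim_equal_is_valid_line1 := by
  intro line _
  unfold Spec_is_valid_line1
  show is_valid_line1 line = is_valid_line1_alt line
  unfold is_valid_line1 is_valid_line1_alt
  simp only [splitOn_eq_splitAux, portA_fold_eq]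
  by_cases hcnt : (line.toList).count ',' = 16
  · have hmem : ',' ∈ line.toList := List.count_pos_iff.mp (by omega)
    obtain ⟨p0, rest, hdec, hp0⟩ := comma_decomp _ hmem
    have hc1 : rest.count ',' = 15 := by
      rw [hdec] at hcnt
      simp [List.count_append, List.count_cons, List.count_eq_zero.mpr hp0] at hcnt
      omega
    have hmem2 : ',' ∈ rest := List.count_pos_iff.mp (by omega)
    obtain ⟨p1, r2, hdec2, hp1⟩ := comma_decomp _ hmem2
    subst hdec2
    have hc2 : r2.count ',' = 14 := by
      simp [List.count_append, List.count_cons, List.count_eq_zero.mpr hp1] at hc1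
      omega
    have hcnt' : ((p0 ++ ',' :: (p1 ++ ',' :: r2)).count ',') = 16 := by rw [← hdec]; exact hcnt
    rw [hdec]
    rw [foldA_main p0 p1 r2 hp0 hp1, splitAux_decomp p0 _ hp0, splitAux_decomp p1 _ hp1]
    simp only [List.reverse_nil, List.nil_append]
    by_cases hL : p0.length = 32
    · by_cases hP : p1.length = 32
      · -- all guards pass on both sides
        rw [all_range_prefix p0 (',' :: (p1 ++ ',' :: r2)) isHexadecimal ' ']
        have hshape : p0 ++ ',' :: (p1 ++ ',' :: r2) = (p0 ++ [',']) ++ (p1 ++ ',' :: r2) := by simp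
        have hb1 : ((p0.length : Int) + 1) = (((p0 ++ [',']).length : Int)) := by
          simp
        have hb2 : ((p0.length : Int) + 1 + (p1.length : Int))
            = (((p0 ++ [',']).length : Int)) + (p1.length : Int) := by
          simp
        rw [hshape, hb1, all_range_mid (p0 ++ [',']) p1 (',' :: r2) isHexadecimal ' ']
        simp [hcnt', hL, hP, splitAux_length, hc2, List.all_append]
      · have hP' : (33 : Int) + (p1.length : Int) ≠ 65 := by
          intro h; apply hP; omega
        simp [hcnt', hL, hP, hP', splitAux_length, hc2]
    · have hL' : ((p0.length : Int)) ≠ 32 := by exact_mod_cast hL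
      simp [hcnt', hL, hL', splitAux_length, hc2]
  · have hcnt' : ((line.toList.count ',' : Nat) : Int) ≠ 16 := by exact_mod_cast hcnt
    simp [foldA_count_zero, hcnt, hcnt', splitAux_length]
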